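-- pv_equiv track=rewrite | github.com/fairlyoddparents/Python-Tutorials-My-Answers-and-First-Game | 7kyu. square_up.py | square_up
-- ===== SOURCE A (Python) =====
-- def square_up(n):
--     result = []
--     lst = [x*0 for x in range(n)]
--     i = -1
--     j = 1
--     for z in range(n):
--         lst[i] = j
--         result += lst
--         i -= 1
--         j += 1
--     return result
-- ===== SOURCE B (Python) =====
-- def square_up(n):
--     return [v for z in range(n)
--               for v in [0] * (n - 1 - z) + list(range(z + 1, 0, -1))]
-- ===== Notes on version B (the rewrite author's own statement) =====
-- stated objective: simpler
-- what changed: Replaces the mutable row buffer, negative-index writes and snapshot concatenation with a comprehension that builds each row in closed form as zero padding followed by a countdown range.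
import Mathlib
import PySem

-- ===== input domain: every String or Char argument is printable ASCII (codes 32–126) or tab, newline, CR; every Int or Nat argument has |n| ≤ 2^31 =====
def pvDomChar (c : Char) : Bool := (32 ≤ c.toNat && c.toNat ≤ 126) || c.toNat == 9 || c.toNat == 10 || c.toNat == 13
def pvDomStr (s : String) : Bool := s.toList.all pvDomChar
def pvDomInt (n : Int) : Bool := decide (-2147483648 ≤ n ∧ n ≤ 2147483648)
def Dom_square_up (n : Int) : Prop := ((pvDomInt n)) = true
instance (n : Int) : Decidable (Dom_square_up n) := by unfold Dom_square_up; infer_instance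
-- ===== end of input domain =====

-- B replaces A's mutable row buffer, negative-index writes and snapshot concatenation
-- with a comprehension building each row in closed form as zero padding ++ countdown range (objective: simpler).

-- ===== PORT A =====
-- the loop body of A: lst[i] = j; result += lst; i -= 1; j += 1  (state: result, lst, i, j)
def squareUpStep (s : List Int × List Int × Int × Int) : List Int × List Int × Int × Int :=
  let lst' := PySem.List.pySetD s.2.1 s.2.2.1 s.2.2.2
  (s.1 ++ lst', lst', s.2.2.1 - 1, s.2.2.2 + 1)

def square_up (n : Int) : List Int :=
  let lst := (PySem.List.pyRange 0 n 1).map (fun x => x * 0)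
  ((PySem.List.pyRange 0 n 1).foldl (fun s _z => squareUpStep s) ([], lst, -1, 1)).1

-- ===== PORT B =====
def square_up_alt (n : Int) : List Int :=
  ((PySem.List.pyRange 0 n 1).map (fun z =>
    List.replicate (n - 1 - z).toNat 0 ++ PySem.List.pyRange (z + 1) 0 (-1))).flatten

-- ===== PRECONDITION & SPEC =====
def Spec_square_up (n : Int) (out : List Int) : Prop := out = square_up_alt n
instance (n : Int) (out : List Int) : Decidable (Spec_square_up n out) := by unfold Spec_square_up; infer_instance

-- ===== CLAIM (what is proved, stated in full; the proofs are below) =====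
def Claim_equal_square_up : Prop := ∀ (n : Int), Dom_square_up n → Spec_square_up n (square_up n)

-- ===== LEMMAS AND PROOFS =====

-- the contents of A's buffer after k assignments, in closed form (list of length m)
def rowL (m k : Nat) : List Int :=
  (List.range m).map (fun c : Nat => if (m : Int) - (k : Int) ≤ (c : Int) then (m : Int) - (c : Int) else 0)

lemma length_rowL (m k : Nat) : (rowL m k).length = m := by simp [rowL]

lemma pySetD_neg (xs : List Int) (k : Nat) (v : Int) (h1 : 0 < k) (h2 : k ≤ xs.length) :
    PySem.List.pySetD xs (-(k : Int)) v = xs.set (xs.length - k) v := by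
  simp only [PySem.List.pySetD, PySem.List.pySet?]
  rw [show PySem.List.pyIdx? xs.length (-(k : Int)) = some (xs.length - k) from ?_]
  · rfl
  · unfold PySem.List.pyIdx?
    split_ifs with h3 <;> simp_all

lemma rowL_succ (m k : Nat) (hk : k < m) :
    PySem.List.pySetD (rowL m k) (-(1 + (k : Int))) (1 + (k : Int)) = rowL m (k + 1) := by
  have h1 : (-(1 + (k : Int))) = -((k + 1 : Nat) : Int) := by push_cast; ring
  rw [h1, pySetD_neg _ _ _ (by omega) (by rw [length_rowL]; omega)]
  rw [length_rowL]
  apply List.ext_getElem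
  · simp [rowL]
  · intro c hc1 hc2
    have hc : c < m := by simpa [length_rowL] using hc1
    rw [List.getElem_set]
    simp only [rowL, List.getElem_map, List.getElem_range]
    push_cast
    split_ifs <;> push_cast at * <;> omega

lemma foldl_step_iterate {α : Type} (l : List α) (s : List Int × List Int × Int × Int) :
    l.foldl (fun s _ => squareUpStep s) s = squareUpStep^[l.length] s := by
  induction l generalizing s with
  | nil => rfl
  | cons x xs ih => simp [List.foldl_cons, ih, Function.iterate_succ_apply]

lemma iterate_inv (m : Nat) : ∀ (t k : Nat), k + t = m → ∀ (res : List Int),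
    squareUpStep^[t] (res, rowL m k, -(1 + (k : Int)), 1 + (k : Int)) =
      (res ++ ((List.range t).map (fun z => rowL m (k + z + 1))).flatten,
       rowL m m, -(1 + (m : Int)), 1 + (m : Int)) := by
  intro t
  induction t with
  | zero => intro k hk res; simp; subst hk; simp
  | succ t ih =>
    intro k hk res
    rw [Function.iterate_succ_apply]
    have hstep : squareUpStep (res, rowL m k, -(1 + (k : Int)), 1 + (k : Int)) =
        (res ++ rowL m (k + 1), rowL m (k + 1), -(1 + ((k + 1 : Nat) : Int)), 1 + ((k + 1 : Nat) : Int)) := by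
      simp only [squareUpStep, rowL_succ m k (by omega), Prod.mk.injEq]
      and_intros <;> first | trivial | (push_cast; ring)
    rw [hstep, ih (k + 1) (by omega)]
    have hmap : (List.range (t + 1)).map (fun z => rowL m (k + z + 1))
        = rowL m (k + 1) :: (List.range t).map (fun z => rowL m (k + 1 + z + 1)) := by
      rw [List.range_succ_eq_map, List.map_cons, List.map_map]
      refine congrArg₂ _ (by simp) ?_
      apply List.map_congr_left
      intro z _
      simp only [Function.comp_apply]
      congr 1
      omega
    rw [hmap, List.flatten_cons, List.append_assoc]

lemma rowL_zero (m : Nat) :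
    ((List.range m).map (fun k : Nat => (k : Int))).map (fun x => x * 0) = rowL m 0 := by
  unfold rowL
  rw [List.map_map]
  apply List.map_congr_left
  intro c hc
  rw [List.mem_range] at hc
  simp only [Function.comp_apply]
  rw [if_neg (by push_cast; omega)]
  ring

lemma rowL_decomp (m z : Nat) (hz : z < m) :
    rowL m (z + 1)
      = List.replicate (m - 1 - z) 0 ++ (List.range (z + 1)).map (fun k : Nat => ((z : Int) + 1) - (k : Int)) := by
  apply List.ext_getElem
  · simp [rowL]; omega
  · intro i hi1 hi2
    have him : i < m := by simpa [rowL] using hi1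
    simp only [rowL, List.getElem_map, List.getElem_range]
    rw [List.getElem_append]
    simp only [List.length_replicate]
    split_ifs with h1 h2 h3
    · exfalso; push_cast at h1; omega
    · simp only [List.getElem_map, List.getElem_range]
      push_cast at h1 ⊢
      omega
    · simp
    · exfalso; push_cast at h1; omega

-- ===== VERDICT (by name: the statement is the Claim_ definition above) =====
theorem square_up_spec : Claim_equal_square_up := by
  intro n _
  unfold Spec_square_up square_up square_up_alt
  by_cases hn : n ≤ 0
  · rw [PySem.List.pyRange_one_eq_nil hn]; rfl
  · rw [not_le] at hn
    have hnm : n = ((n.toNat : Nat) : Int) := by omega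
    set m : Nat := n.toNat with hm
    rw [PySem.List.pyRange_one]
    simp only [sub_zero, zero_add, ← hm]
    rw [rowL_zero, foldl_step_iterate]
    simp only [List.length_map, List.length_range]
    have hiter := iterate_inv m m 0 (by omega) []
    norm_num at hiter
    rw [hiter]
    simp only [List.map_map]
    apply congrArg
    apply List.map_congr_left
    intro z hz
    rw [List.mem_range] at hz
    simp only [Function.comp_apply]
    rw [rowL_decomp m z hz, PySem.List.pyRange_neg_one]
    have hlen : (n - 1 - (z : Int)).toNat = m - 1 - z := by omega
    rw [hlen]
    have hr : ((z : Int) + 1 - 0).toNat = z + 1 := by omega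
    rw [hr]
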